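-- pv_equiv track=rewrite | github.com/kammox/Projet_Tweets | src/preprocessing.py | corpus_statistics
-- ===== SOURCE A (Python) =====
-- from typing import List
-- from collections import Counter
--
-- def corpus_statistics(corpus: List[str]) -> dict:
--     """Retourne quelques stats sur le corpus nettoyé."""
--     all_tokens = []
--     for text in corpus:
--         tokens = text.split()
--         all_tokens.extend(tokens)
--     total_tokens = len(all_tokens)
--     unique_tokens = len(set(all_tokens))
--     single_occurrence = sum(1 for word, count in Counter(all_tokens).items() if count == 1)
--     return {
--         "total_tokens": total_tokens,
--         "unique_tokens": unique_tokens,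
--         "single_occurrence": single_occurrence
--     }
-- ===== SOURCE B (Python) =====
-- from typing import List
--
-- def corpus_statistics(corpus: List[str]) -> dict:
--     """Sort the tokens, then one scan over adjacent runs gives all three stats."""
--     tokens = sorted(t for text in corpus for t in text.split())
--     unique = 0
--     single = 0
--     prev = None
--     run = 0
--     for t in tokens:
--         if t != prev:
--             unique += 1
--             if run == 1:
--                 single += 1
--             prev = t
--             run = 1
--         else:
--             run += 1
--     if run == 1:
--         single += 1
--     return {
--         "total_tokens": len(tokens),
--         "unique_tokens": unique,
--         "single_occurrence": single
--     }
-- ===== Notes on version B (the rewrite author's own statement) =====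
-- stated objective: alternative
-- what changed: B sorts the flattened token list and derives all three stats from one scan over adjacent runs (run boundaries = distinct tokens, runs of length 1 = hapaxes), instead of A's set and Counter frequency table over an unsorted list.
import Mathlib
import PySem

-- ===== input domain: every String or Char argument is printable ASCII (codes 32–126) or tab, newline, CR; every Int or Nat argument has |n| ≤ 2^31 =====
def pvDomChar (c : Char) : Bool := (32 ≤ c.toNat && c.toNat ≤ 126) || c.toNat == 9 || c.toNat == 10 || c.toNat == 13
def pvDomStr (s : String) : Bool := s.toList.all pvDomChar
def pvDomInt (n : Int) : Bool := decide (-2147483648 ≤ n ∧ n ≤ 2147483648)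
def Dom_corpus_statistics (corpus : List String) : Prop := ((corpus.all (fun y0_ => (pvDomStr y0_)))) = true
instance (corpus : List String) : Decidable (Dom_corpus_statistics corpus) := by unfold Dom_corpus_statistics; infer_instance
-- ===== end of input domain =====

-- B sorts the flattened token list and reads all three stats off one scan over
-- adjacent runs, instead of A's set + Counter over the unsorted list (objective: alternative).

-- ===== PORT A =====
def corpus_statistics (corpus : List String) : List (String × Int) :=
  let all_tokens := corpus.foldl (fun acc text => acc ++ PySem.Str.split₀ text) []
  let total_tokens : Int := all_tokens.length
  let unique_tokens : Int := (PySem.Set.ofList all_tokens).length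
  let single_occurrence : Int :=
    ((PySem.Dict.counter all_tokens).items.map
      (fun p => if p.2 == 1 then (1 : Int) else 0)).sum
  [("total_tokens", total_tokens), ("unique_tokens", unique_tokens),
   ("single_occurrence", single_occurrence)]

-- ===== PORT B =====
-- the body of Source B's for-loop: state (prev, run, unique, single)
def pvScanStep (st : Option String × Int × Int × Int) (t : String) :
    Option String × Int × Int × Int :=
  if some t ≠ st.1 then
    (some t, 1, st.2.2.1 + 1, st.2.2.2 + (if st.2.1 == 1 then 1 else 0))
  else
    (st.1, st.2.1 + 1, st.2.2.1, st.2.2.2)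

def corpus_statistics_alt (corpus : List String) : List (String × Int) :=
  let tokens := PySem.List.sorted (corpus.flatMap (fun text => PySem.Str.split₀ text)) (fun x => x) false
  let st := tokens.foldl pvScanStep ((none : Option String), 0, 0, 0)
  let single := st.2.2.2 + (if st.2.1 == 1 then 1 else 0)
  [("total_tokens", (tokens.length : Int)),
   ("unique_tokens", st.2.2.1),
   ("single_occurrence", single)]

-- ===== PRECONDITION & SPEC =====
def Spec_corpus_statistics (corpus : List String) (out : List (String × Int)) : Prop := out = corpus_statistics_alt corpus
instance (corpus : List String) (out : List (String × Int)) : Decidable (Spec_corpus_statistics corpus out) := by unfold Spec_corpus_statistics; infer_instance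

-- ===== CLAIM (what is proved, stated in full; the proofs are below) =====
def Claim_equal_corpus_statistics : Prop := ∀ (corpus : List String), Dom_corpus_statistics corpus → Spec_corpus_statistics corpus (corpus_statistics corpus)

-- ===== LEMMAS AND PROOFS =====

-- the number of distinct elements of l
def pvU (l : List String) : Nat := l.toFinset.card
-- the number of hapaxes (distinct elements occurring exactly once) of l
def pvH (l : List String) : Nat := (l.toFinset.filter (fun k => l.count k = 1)).card

theorem pvU_perm {l l' : List String} (h : l.Perm l') : pvU l = pvU l' := by
  rw [pvU, pvU, List.toFinset_eq_of_perm _ _ h]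

theorem pvH_perm {l l' : List String} (h : l.Perm l') : pvH l = pvH l' := by
  unfold pvH
  rw [List.toFinset_eq_of_perm _ _ h]
  exact congrArg Finset.card (Finset.filter_congr (by intro k _; simp [h.count_eq]))

-- the scan over a run-decomposed sorted suffix: prev = a with pending run length rn
theorem pvScan_run (s : List String) (hs : s.Pairwise (· ≤ ·)) :
    ∀ (a : String) (rn : Nat) (u si : Int), 0 < rn → (∀ x ∈ s, a ≤ x) →
    (fun st => (st.2.2.1, st.2.2.2 + (if st.2.1 == 1 then (1 : Int) else 0)))
        (s.foldl pvScanStep (some a, (rn : Int), u, si))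
      = (u - 1 + (pvU (List.replicate rn a ++ s) : Int),
         si + (pvH (List.replicate rn a ++ s) : Int)) := by
  induction s with
  | nil =>
    intro a rn u si hrn _
    simp only [List.foldl_nil, List.append_nil]
    have hU : pvU (List.replicate rn a) = 1 := by
      simp [pvU, List.toFinset_replicate_of_ne_zero hrn.ne']
    have hH : pvH (List.replicate rn a) = if rn = 1 then 1 else 0 := by
      unfold pvH
      rw [List.toFinset_replicate_of_ne_zero hrn.ne']
      simp [Finset.filter_singleton]
      split_ifs <;> simp
    simp only [hU, hH, Prod.mk.injEq]
    refine ⟨by push_cast; ring, ?_⟩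
    by_cases h : rn = 1
    · subst h
      rw [if_pos (by norm_num), if_pos rfl]
      norm_num
    · have h' : ((rn : Int)) ≠ 1 := by exact_mod_cast h
      rw [if_neg (by simp [h']), if_neg h]
      norm_num
  | cons b t ih =>
    intro a rn u si hrn hle
    have hab : a ≤ b := hle b (by simp)
    have hbt : ∀ x ∈ t, b ≤ x := fun x hx => (List.pairwise_cons.mp hs).1 x hx
    have ht : t.Pairwise (· ≤ ·) := (List.pairwise_cons.mp hs).2
    by_cases hba : b = a
    · -- run continues
      subst hba
      have hstep : pvScanStep (some b, (rn : Int), u, si) b = (some b, (rn : Int) + 1, u, si) := by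
        simp [pvScanStep]
      have hcast : ((rn : Int) + 1) = ((rn + 1 : Nat) : Int) := by push_cast; ring
      have heq : List.replicate (rn + 1) b ++ t = List.replicate rn b ++ b :: t := by
        rw [List.replicate_succ']; simp
      have h2 := ih ht b (rn + 1) u si (by omega) hbt
      rw [List.foldl_cons, hstep, hcast, h2, heq]
    · -- new run starts at b
      have hstep : pvScanStep (some a, (rn : Int), u, si) b
          = (some b, 1, u + 1, si + (if (rn : Int) == 1 then 1 else 0)) := by
        simp [pvScanStep, hba]
      have hnotin : a ∉ b :: t := by
        simp only [List.mem_cons, not_or]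
        exact ⟨fun h => hba h.symm, fun hin => hba (le_antisymm hab (hbt a hin)).symm⟩
      have h2 := ih ht b 1 (u + 1) (si + (if (rn : Int) == 1 then 1 else 0)) (by omega) hbt
      rw [Nat.cast_one] at h2
      rw [show (List.replicate 1 b ++ t) = b :: t by simp] at h2
      have hU : pvU (List.replicate rn a ++ b :: t) = 1 + pvU (b :: t) := by
        unfold pvU
        rw [List.toFinset_append, List.toFinset_replicate_of_ne_zero hrn.ne',
            Finset.singleton_union,
            Finset.card_insert_of_notMem (by simpa using hnotin)]
        omega
      have hcnt_a : (List.replicate rn a ++ b :: t).count a = rn := by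
        simp [List.count_append, List.count_eq_zero_of_not_mem hnotin]
      have hcnt_x : ∀ x, x ≠ a → (List.replicate rn a ++ b :: t).count x = (b :: t).count x := by
        intro x hx
        simp only [List.count_append, List.count_replicate]
        have : ¬ (a = x) := fun h => hx h.symm
        simp [this]
      have hH : pvH (List.replicate rn a ++ b :: t)
          = (if rn = 1 then 1 else 0) + pvH (b :: t) := by
        unfold pvH
        rw [List.toFinset_append, List.toFinset_replicate_of_ne_zero hrn.ne',
            Finset.singleton_union, Finset.filter_insert]
        have hrw : Finset.filter (fun k => (List.replicate rn a ++ b :: t).count k = 1) (b :: t).toFinset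
            = Finset.filter (fun k => (b :: t).count k = 1) (b :: t).toFinset := by
          apply Finset.filter_congr
          intro k hk
          have hka : k ≠ a := by
            intro h; subst h; exact hnotin (List.mem_toFinset.mp hk)
          simp [hcnt_x k hka]
        have hamem : a ∉ Finset.filter (fun k => (List.replicate rn a ++ b :: t).count k = 1) (b :: t).toFinset := by
          simp only [Finset.mem_filter]
          rintro ⟨hmem, -⟩
          exact hnotin (List.mem_toFinset.mp hmem)
        by_cases h : rn = 1
        · rw [if_pos (by rw [hcnt_a]; exact h), Finset.card_insert_of_notMem hamem, hrw, if_pos h]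
          omega
        · rw [if_neg (by rw [hcnt_a]; exact h), hrw, if_neg h]
          omega
      rw [List.foldl_cons, hstep, h2, hU, hH, Prod.mk.injEq]
      refine ⟨by push_cast; ring, ?_⟩
      by_cases h : rn = 1
      · subst h
        rw [if_pos (by norm_num), if_pos rfl]
        push_cast
        ring
      · have h' : ((rn : Int)) ≠ 1 := by exact_mod_cast h
        rw [if_neg (by simp [h']), if_neg h]
        push_cast
        ring

-- the whole scan on a sorted list computes (#distinct, #hapaxes)
theorem pvScan_spec (s : List String) (hs : s.Pairwise (· ≤ ·)) :
    (fun st => (st.2.2.1, st.2.2.2 + (if st.2.1 == 1 then (1 : Int) else 0)))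
        (s.foldl pvScanStep ((none : Option String), 0, 0, 0))
      = ((pvU s : Int), (pvH s : Int)) := by
  cases s with
  | nil => simp [pvU, pvH]
  | cons b t =>
    have hstep : pvScanStep ((none : Option String), 0, 0, 0) b = (some b, 1, 1, 0) := by
      simp [pvScanStep]
    have hbt : ∀ x ∈ t, b ≤ x := fun x hx => (List.pairwise_cons.mp hs).1 x hx
    have ht : t.Pairwise (· ≤ ·) := (List.pairwise_cons.mp hs).2
    have h2 := pvScan_run t ht b 1 1 0 (by omega) hbt
    rw [show (List.replicate 1 b ++ t) = b :: t by simp] at h2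
    simp only [List.foldl_cons, hstep]
    simpa using h2

-- A's flat all_tokens list is the flatMap of the per-text splits
theorem pv_all_tokens_eq_flatMap (corpus : List String) :
    corpus.foldl (fun acc text => acc ++ PySem.Str.split₀ text) []
    = corpus.flatMap (fun t => PySem.Str.split₀ t) := by
  simpa using PySem.List.foldl_append_eq_flatMap (fun t => PySem.Str.split₀ t) corpus []

-- A's set size is the number of distinct elements
theorem pv_setLen_eq_pvU (l : List String) : (PySem.Set.ofList l).length = pvU l := by
  have hnd : (PySem.Set.ofList l).Nodup := PySem.Set.nodup_ofList l
  have htf : (PySem.Set.ofList l).toFinset = l.toFinset := by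
    apply Finset.ext; intro a
    simp [List.mem_toFinset, PySem.Set.mem_ofList]
  rw [pvU, ← htf, List.toFinset_card_of_nodup hnd]

-- A's Counter-based hapax sum is the number of hapaxes
theorem pv_counterSum_eq_pvH (l : List String) :
    ((PySem.Dict.counter l).items.map (fun p => if p.2 == 1 then (1 : Int) else 0)).sum
      = (pvH l : Int) := by
  rw [PySem.Dict.items_counter, List.map_map]
  have : ((fun p : String × Int => if p.2 == 1 then (1 : Int) else 0) ∘
        (fun k => (k, (l.count k : Int))))
      = fun k => if (l.count k : Int) == 1 then (1 : Int) else 0 := rfl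
  rw [this, PySem.List.sum_map_ite_one_zero]
  congr 1
  have hnd : (PySem.Set.ofList l).Nodup := PySem.Set.nodup_ofList l
  have hcount : (PySem.Set.ofList l).countP (fun k => (l.count k : Int) == 1)
      = ((PySem.Set.ofList l).filter (fun k => (l.count k : Int) == 1)).length := by
    rw [List.countP_eq_length_filter]
  rw [hcount]
  have hfil_nd : ((PySem.Set.ofList l).filter (fun k => (l.count k : Int) == 1)).Nodup :=
    hnd.filter _
  rw [← List.toFinset_card_of_nodup hfil_nd]
  unfold pvH
  congr 1
  apply Finset.ext; intro a
  simp only [List.mem_toFinset, List.mem_filter, Finset.mem_filter, PySem.Set.mem_ofList]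
  constructor
  · rintro ⟨hm, hc⟩
    refine ⟨hm, ?_⟩
    simpa using (by exact_mod_cast (by simpa using hc : (l.count a : Int) = 1) : (l.count a : Int) = 1)
  · rintro ⟨hm, hc⟩
    exact ⟨hm, by simp [hc]⟩

-- ===== VERDICT (by name: the statement is the Claim_ definition above) =====
theorem corpus_statistics_spec : Claim_equal_corpus_statistics := by
  intro corpus _
  unfold Spec_corpus_statistics corpus_statistics corpus_statistics_alt
  rw [pv_all_tokens_eq_flatMap]
  set flat := corpus.flatMap (fun t => PySem.Str.split₀ t) with hflat
  set s := PySem.List.sorted flat (fun x => x) false with hsorted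
  have hperm : s.Perm flat := PySem.List.sorted_perm flat (fun x => x) false
  have hpw : s.Pairwise (· ≤ ·) := by
    simpa using PySem.List.sorted_pairwise flat (fun x => x)
  have hscan := pvScan_spec s hpw
  have hu : (s.foldl pvScanStep ((none : Option String), 0, 0, 0)).2.2.1 = (pvU s : Int) :=
    congrArg Prod.fst hscan
  have hsi : (s.foldl pvScanStep ((none : Option String), 0, 0, 0)).2.2.2 +
      (if (s.foldl pvScanStep ((none : Option String), 0, 0, 0)).2.1 == 1 then (1:Int) else 0)
      = (pvH s : Int) := congrArg Prod.snd hscan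
  simp only []
  refine congrArg₂ _ ?_ (congrArg₂ _ ?_ (congrArg₂ _ ?_ rfl))
  · exact congrArg _ (by rw [hperm.length_eq])
  · refine congrArg _ ?_
    rw [pv_setLen_eq_pvU, hu, pvU_perm hperm]
  · refine congrArg _ ?_
    rw [pv_counterSum_eq_pvH, hsi, pvH_perm hperm]
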